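-- pv_equiv track=rewrite | github.com/refi64/mathworks | multiples.py | getMultiples
-- ===== SOURCE A (Python) =====
-- def getMultiples(number, count):
--     counter = 0
--     multiples = 0
--     result = []
--     total = count
--     while multiples < total:
--         counter +=  1
--         if counter % number != 0:
--             continue
--         multiples += 1
--         result.append(counter)
--     return result
-- ===== SOURCE B (Python) =====
-- def getMultiples(number, count):
--     step = abs(number)
--     return [step * i for i in range(1, count + 1)]
-- ===== Notes on version B (the rewrite author's own statement) =====
-- stated objective: faster
-- what changed: Replaces the counter-scanning while loop (which tests every integer for divisibility) with direct arithmetic producing abs(number)*i for i in 1..count.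
import Mathlib
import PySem

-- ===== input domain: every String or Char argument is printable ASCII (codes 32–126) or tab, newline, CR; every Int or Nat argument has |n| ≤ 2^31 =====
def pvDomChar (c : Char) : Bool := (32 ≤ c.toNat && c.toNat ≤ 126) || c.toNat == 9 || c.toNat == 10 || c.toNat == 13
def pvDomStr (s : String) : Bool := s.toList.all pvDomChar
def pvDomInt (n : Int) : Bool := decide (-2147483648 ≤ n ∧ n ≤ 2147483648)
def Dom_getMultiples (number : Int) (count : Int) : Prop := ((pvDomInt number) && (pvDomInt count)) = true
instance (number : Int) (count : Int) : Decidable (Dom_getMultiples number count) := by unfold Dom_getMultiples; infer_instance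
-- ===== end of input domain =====

-- B replaces A's counter-by-counter divisibility scan with direct arithmetic abs(number)*i, i = 1..count (asymptotically faster).

-- ===== PORT A =====
-- the while loop, step for step; fuel only makes the loop total (count*|number| iterations
-- always suffice when number ≠ 0; number = 0 with count > 0 is excluded by Pre_, where Python raises)
def getMultiplesLoop (number : Int) (total : Int) (counter : Int) (multiples : Int)
    (result : List Int) : Nat → List Int
  | 0 => result
  | fuel + 1 =>
    if multiples < total then
      let counter := counter + 1
      if PySem.Int.mod counter number ≠ 0 then
        getMultiplesLoop number total counter multiples result fuel
      else
        getMultiplesLoop number total counter (multiples + 1) (result ++ [counter]) fuel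
    else result

def getMultiples (number : Int) (count : Int) : List Int :=
  getMultiplesLoop number count 0 0 [] (count.toNat * number.natAbs + 1)

-- ===== PORT B =====
def getMultiples_alt (number : Int) (count : Int) : List Int :=
  let step : Int := |number|
  (PySem.List.pyRange 1 (count + 1) 1).map (fun i => step * i)

-- ===== PRECONDITION & SPEC =====
-- Pre_ excludes exactly the inputs on which A raises ZeroDivisionError (number == 0 with count > 0)
def Pre_getMultiples (number : Int) (count : Int) : Prop := number ≠ 0 ∨ count ≤ 0
instance (number : Int) (count : Int) : Decidable (Pre_getMultiples number count) := by
  unfold Pre_getMultiples; infer_instance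
def pvWitness_getMultiples : Int × Int := (3, 4)

def Spec_getMultiples (number : Int) (count : Int) (out : List Int) : Prop := out = getMultiples_alt number count
instance (number : Int) (count : Int) (out : List Int) : Decidable (Spec_getMultiples number count out) := by unfold Spec_getMultiples; infer_instance

-- ===== CLAIM (what is proved, stated in full; the proofs are below) =====
def Claim_equal_getMultiples : Prop := ∀ (number : Int) (count : Int), Dom_getMultiples number count → Pre_getMultiples number count → Spec_getMultiples number count (getMultiples number count)

-- ===== LEMMAS AND PROOFS =====

-- loop invariant: from counter = m*|n| + j (0 ≤ j < |n|) with enough fuel, the loop appends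
-- exactly the multiples (m+1)*|n| .. total*|n|
theorem getMultiplesLoop_spec (n : Int) (hn : n ≠ 0) (total : Int) :
    ∀ (fuel : Nat) (m j : Nat) (c mv : Int) (res : List Int),
      c = (m : Int) * |n| + j → mv = (m : Int) →
      (j : Int) < |n| →
      (total - m) * |n| - j ≤ (fuel : Int) →
      getMultiplesLoop n total c mv res fuel =
        res ++ (List.range' (m + 1) ((total - m).toNat)).map (fun i : Nat => (i : Int) * |n|) := by
  have hpos : (0 : Int) < |n| := abs_pos.mpr hn
  intro fuel
  induction fuel with
  | zero =>
    intro m j c mv res hc hmv hj hfuel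
    subst hc hmv
    by_cases hm : (m : Int) < total
    · exfalso
      have h1 : (1 : Int) ≤ total - m := by omega
      have h2 : (1 : Int) * |n| ≤ (total - ↑m) * |n| := mul_le_mul_of_nonneg_right h1 (le_of_lt hpos)
      push_cast at hfuel
      linarith
    · have : (total - m).toNat = 0 := by omega
      simp [getMultiplesLoop, this]
  | succ f ih =>
    intro m j c mv res hc hmv hj hfuel
    subst hc hmv
    by_cases hm : (m : Int) < total
    · have hdvd : PySem.Int.mod ((m : Int) * |n| + j + 1) n = 0 ↔ (j : Int) + 1 = |n| := by
        rw [PySem.Int.mod_eq_zero_iff_dvd]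
        constructor
        · intro h
          have h2 : |n| ∣ (m : Int) * |n| + j + 1 := (abs_dvd _ _).mpr h
          have h3 : |n| ∣ (j : Int) + 1 := by
            have h4 := h2.sub (dvd_mul_left |n| (m : Int))
            have h5 : (m : Int) * |n| + ↑j + 1 - ↑m * |n| = ↑j + 1 := by ring
            rwa [h5] at h4
          rcases h3 with ⟨k, hk⟩
          have hk1 : 1 ≤ k := by nlinarith
          have hk2 : k < 2 := by nlinarith
          have : k = 1 := by omega
          simp [this] at hk; omega
        · intro h
          refine (abs_dvd _ _).mp ⟨m + 1, ?_⟩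
          rw [← h]; ring
      rw [getMultiplesLoop]
      simp only [hm, if_pos]
      by_cases hj1 : (j : Int) + 1 = |n|
      · have hmod : ¬ (PySem.Int.mod ((m : Int) * |n| + j + 1) n ≠ 0) := by
          simp [hdvd, hj1]
        simp only [hmod, if_false]
        rw [ih (m + 1) 0 _ _ _ (by push_cast; rw [← hj1]; ring) (by push_cast; ring)
          (by exact_mod_cast hpos) (by push_cast at hfuel ⊢; nlinarith)]
        have hlen : (total - m).toNat = (total - (m + 1 : Nat)).toNat + 1 := by push_cast; omega
        rw [hlen, List.range'_succ]
        have he : (m : Int) * |n| + j + 1 = ((m + 1 : Nat) : Int) * |n| := by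
          push_cast; rw [← hj1]; ring
        simp [List.append_assoc, he]
      · have hj1' : (j : Int) + 1 < |n| := lt_of_le_of_ne (by omega) hj1
        have hmod : PySem.Int.mod ((m : Int) * |n| + j + 1) n ≠ 0 := by
          simp [hdvd]; omega
        rw [if_pos hmod]
        exact ih m (j + 1) _ _ res (by push_cast; ring) rfl (by exact_mod_cast hj1')
          (by push_cast at hfuel ⊢; omega)
    · have : (total - m).toNat = 0 := by omega
      simp [getMultiplesLoop, hm, this]

theorem getMultiples_alt_eq (n : Int) (count : Int) :
    getMultiples_alt n count = (List.range' 1 count.toNat).map (fun i : Nat => (i : Int) * |n|) := by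
  unfold getMultiples_alt
  rw [PySem.List.pyRange_one]
  have h1 : (count + 1 - 1).toNat = count.toNat := by omega
  rw [h1, List.range'_eq_map_range]
  apply List.ext_getElem
  · simp
  · intro k h₁ h₂
    simp
    ring

theorem getMultiples_spec : Claim_equal_getMultiples := by
  intro number count _ hpre
  unfold Spec_getMultiples getMultiples
  rcases hpre with hn | hc
  · rw [getMultiplesLoop_spec number hn count (count.toNat * number.natAbs + 1) 0 0 0 0 []
      (by simp) (by simp)
      (by exact_mod_cast abs_pos.mpr hn)
      (by
        have h2 : count ≤ (count.toNat : Int) := Int.self_le_toNat count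
        have ha : (0 : Int) ≤ |number| := abs_nonneg number
        have h3 := mul_le_mul_of_nonneg_right h2 ha
        push_cast
        linarith)]
    rw [getMultiples_alt_eq]
    simp
  · have h1 : count.toNat = 0 := by omega
    have hm : ¬ ((0 : Int) < count) := by omega
    rw [getMultiples_alt_eq, h1]
    simp [getMultiplesLoop, hm]
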